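-- pv_equiv track=rewrite | github.com/morimori00/asktowebapi | test.py | get_tag_index
-- ===== SOURCE A (Python) =====
-- def get_tag_index(pos,tag_texts):
--     index = 0
--     for tag_text in tag_texts:
--         # タグの中に位置が含まれる場合はそのタグの位置を返す
--         if pos < len(tag_text):
--             return index
--         pos -= len(tag_text)
--         index += 1
--     return -1
-- ===== SOURCE B (Python) =====
-- def get_tag_index(pos, tag_texts):
--     # prefix[i] = total length of tags 0..i; answer = bisect_right(prefix, pos)
--     prefix = []
--     total = 0
--     for t in tag_texts:
--         total += len(t)
--         prefix.append(total)
--     lo, hi = 0, len(prefix)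
--     while lo < hi:
--         mid = (lo + hi) // 2
--         if prefix[mid] <= pos:
--             lo = mid + 1
--         else:
--             hi = mid
--     return lo if lo < len(prefix) else -1
-- ===== Notes on version B (the rewrite author's own statement) =====
-- stated objective: alternative
-- what changed: Replaces the linear cumulative-subtraction scan by building a prefix-sum table once and binary-searching it (hand-rolled bisect_right) for the first prefix exceeding pos.
import Mathlib
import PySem

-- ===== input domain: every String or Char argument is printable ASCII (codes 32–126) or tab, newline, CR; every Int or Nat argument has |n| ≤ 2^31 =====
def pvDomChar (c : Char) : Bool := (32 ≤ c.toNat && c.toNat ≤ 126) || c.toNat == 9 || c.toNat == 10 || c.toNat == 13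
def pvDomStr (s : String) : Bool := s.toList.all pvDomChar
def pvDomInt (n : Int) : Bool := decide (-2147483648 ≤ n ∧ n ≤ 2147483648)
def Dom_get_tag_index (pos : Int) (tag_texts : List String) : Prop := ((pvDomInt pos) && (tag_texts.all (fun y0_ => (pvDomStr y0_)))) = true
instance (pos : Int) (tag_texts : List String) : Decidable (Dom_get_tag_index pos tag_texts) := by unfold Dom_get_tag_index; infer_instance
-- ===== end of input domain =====

-- B replaces A's cumulative-subtraction linear scan by a prefix-sum table plus a
-- hand-rolled bisect_right binary search; objective: alternative (same exact values).

-- ===== PORT A =====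
def get_tag_index_go (pos : Int) (index : Int) (tags : List String) : Int :=
  match tags with
  | [] => -1
  | t :: rest =>
      if pos < PySem.Str.len t then index
      else get_tag_index_go (pos - PySem.Str.len t) (index + 1) rest

def get_tag_index (pos : Int) (tag_texts : List String) : Int :=
  get_tag_index_go pos 0 tag_texts

-- ===== PORT B =====
-- the prefix-sum building loop of Source B
def pvPrefix (tag_texts : List String) : List Int :=
  (tag_texts.foldl (fun (st : List Int × Int) t =>
      (st.1 ++ [st.2 + PySem.Str.len t], st.2 + PySem.Str.len t)) ([], 0)).1

-- the while-loop binary search of Source B (bisect_right)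
def pvBisect (pfx : List Int) (pos : Int) (lo hi : Nat) : Nat :=
  if lo < hi then
    if pfx.getD ((lo + hi) / 2) 0 ≤ pos then pvBisect pfx pos ((lo + hi) / 2 + 1) hi
    else pvBisect pfx pos lo ((lo + hi) / 2)
  else lo
termination_by hi - lo
decreasing_by all_goals omega

def get_tag_index_alt (pos : Int) (tag_texts : List String) : Int :=
  let pfx := pvPrefix tag_texts
  let lo := pvBisect pfx pos 0 pfx.length
  if lo < pfx.length then (lo : Int) else -1

-- ===== PRECONDITION & SPEC =====
def Spec_get_tag_index (pos : Int) (tag_texts : List String) (out : Int) : Prop := out = get_tag_index_alt pos tag_texts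
instance (pos : Int) (tag_texts : List String) (out : Int) : Decidable (Spec_get_tag_index pos tag_texts out) := by unfold Spec_get_tag_index; infer_instance

-- ===== CLAIM (what is proved, stated in full; the proofs are below) =====
def Claim_equal_get_tag_index : Prop := ∀ (pos : Int) (tag_texts : List String), Dom_get_tag_index pos tag_texts → Spec_get_tag_index pos tag_texts (get_tag_index pos tag_texts)

-- ===== LEMMAS AND PROOFS =====

-- recursive reading of the prefix-sum list
def pvPrefixRec (acc : Int) : List String → List Int
  | [] => []
  | t :: rest => (acc + PySem.Str.len t) :: pvPrefixRec (acc + PySem.Str.len t) rest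

theorem pvLen_nonneg (t : String) : 0 ≤ PySem.Str.len t := by
  simp [PySem.Str.len_eq]

theorem pvPrefix_foldl (tags : List String) : ∀ (p : List Int) (tot : Int),
    (tags.foldl (fun (st : List Int × Int) t =>
      (st.1 ++ [st.2 + PySem.Str.len t], st.2 + PySem.Str.len t)) (p, tot)).1
    = p ++ pvPrefixRec tot tags := by
  induction tags with
  | nil => intro p tot; simp [pvPrefixRec]
  | cons t rest ih =>
      intro p tot
      simp only [List.foldl_cons, pvPrefixRec]
      rw [ih]
      simp

theorem pvPrefix_eq (tags : List String) : pvPrefix tags = pvPrefixRec 0 tags := by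
  simpa using pvPrefix_foldl tags [] 0

theorem pvPrefixRec_length (tags : List String) : ∀ a, (pvPrefixRec a tags).length = tags.length := by
  induction tags with
  | nil => intro a; simp [pvPrefixRec]
  | cons t rest ih => intro a; simp [pvPrefixRec, ih]

theorem pvPrefixRec_mem_lb (tags : List String) : ∀ a x, x ∈ pvPrefixRec a tags → a ≤ x := by
  induction tags with
  | nil => intro a x h; simp [pvPrefixRec] at h
  | cons t rest ih =>
      intro a x h
      simp only [pvPrefixRec, List.mem_cons] at h
      rcases h with h | h
      · have := pvLen_nonneg t; omega
      · have := ih (a + PySem.Str.len t) x h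
        have := pvLen_nonneg t; omega

theorem pvPrefixRec_shift (tags : List String) : ∀ (a b : Int),
    pvPrefixRec (a + b) tags = (pvPrefixRec b tags).map (a + ·) := by
  induction tags with
  | nil => intro a b; simp [pvPrefixRec]
  | cons t rest ih =>
      intro a b
      simp only [pvPrefixRec, List.map_cons]
      rw [show a + b + PySem.Str.len t = a + (b + PySem.Str.len t) by ring,
        ih a (b + PySem.Str.len t)]

theorem pvCountP_shift (pos a : Int) (X : List Int) :
    (X.map (a + ·)).countP (fun x => x ≤ pos) = X.countP (fun x => x ≤ pos - a) := by
  rw [List.countP_map]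
  congr 1
  funext x
  simp only [Function.comp]
  exact decide_eq_decide.mpr (by omega)

theorem pvPrefixRec_mono (tags : List String) : ∀ (a : Int) (i j : Nat), i ≤ j →
    j < (pvPrefixRec a tags).length →
    (pvPrefixRec a tags).getD i 0 ≤ (pvPrefixRec a tags).getD j 0 := by
  induction tags with
  | nil => intro a i j _ hj; simp [pvPrefixRec] at hj
  | cons t rest ih =>
      intro a i j hij hj
      simp only [pvPrefixRec, List.length_cons] at hj ⊢
      match i, j with
      | 0, 0 => simp
      | 0, (j+1) =>
          simp only [List.getD_cons_zero, List.getD_cons_succ]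
          have hjlen : j < (pvPrefixRec (a + PySem.Str.len t) rest).length := by
            have hr := pvPrefixRec_length rest (a + PySem.Str.len t); omega
          have hmem : (pvPrefixRec (a + PySem.Str.len t) rest).getD j 0
              ∈ pvPrefixRec (a + PySem.Str.len t) rest := by
            rw [List.getD_eq_getElem _ _ hjlen]; exact List.getElem_mem hjlen
          exact pvPrefixRec_mem_lb rest _ _ hmem
      | (i+1), (j+1) =>
          simp only [List.getD_cons_succ]
          apply ih (a + PySem.Str.len t) i j (by omega)
          rw [pvPrefixRec_length]
          rw [pvPrefixRec_length] at hj
          omega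

-- A's scan returns (idx + count of prefixes ≤ pos) when some prefix exceeds pos, else -1
theorem pvGoA (tags : List String) : ∀ (pos idx : Int),
    get_tag_index_go pos idx tags =
      (if (pvPrefixRec 0 tags).countP (fun x => x ≤ pos) < tags.length
       then idx + ((pvPrefixRec 0 tags).countP (fun x => x ≤ pos) : Int)
       else -1) := by
  induction tags with
  | nil => intro pos idx; simp [get_tag_index_go, pvPrefixRec]
  | cons t rest ih =>
      intro pos idx
      by_cases h : pos < PySem.Str.len t
      · have hgo : get_tag_index_go pos idx (t :: rest) = idx := by
          simp only [get_tag_index_go]; rw [if_pos h]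
        have hrest : (pvPrefixRec (0 + PySem.Str.len t) rest).countP (fun x => x ≤ pos) = 0 := by
          rw [List.countP_eq_zero]
          intro x hx
          have := pvPrefixRec_mem_lb rest _ _ hx
          simp only [decide_eq_true_eq]
          omega
        have hd : decide ((0 : Int) + PySem.Str.len t ≤ pos) = false :=
          decide_eq_false (by omega)
        have hc : (pvPrefixRec 0 (t :: rest)).countP (fun x => x ≤ pos) = 0 := by
          simp only [pvPrefixRec, List.countP_cons, hrest, hd]
          simp
        rw [hgo, hc]
        simp
      · have hgo : get_tag_index_go pos idx (t :: rest)
            = get_tag_index_go (pos - PySem.Str.len t) (idx + 1) rest := by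
          simp only [get_tag_index_go]; rw [if_neg h]
        have hshift : pvPrefixRec ((0 : Int) + PySem.Str.len t) rest
            = (pvPrefixRec 0 rest).map (PySem.Str.len t + ·) := by
          rw [show (0 : Int) + PySem.Str.len t = PySem.Str.len t + 0 by ring,
            pvPrefixRec_shift]
        have hd : decide ((0 : Int) + PySem.Str.len t ≤ pos) = true :=
          decide_eq_true (by omega)
        have hc : (pvPrefixRec 0 (t :: rest)).countP (fun x => x ≤ pos)
            = (pvPrefixRec 0 rest).countP (fun x => x ≤ pos - PySem.Str.len t) + 1 := by
          simp only [pvPrefixRec, List.countP_cons, hd]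
          rw [hshift, pvCountP_shift]
          simp
        rw [hgo, ih (pos - PySem.Str.len t) (idx + 1), hc]
        simp only [List.length_cons]
        split_ifs with h1 h2 h2
        · push_cast; ring
        · omega
        · omega
        · rfl

-- the binary search keeps its invariant: left of the result every prefix ≤ pos, right of it > pos
theorem pvBisect_inv (P : List Int) (pos : Int)
    (hmono : ∀ i j : Nat, i ≤ j → j < P.length → P.getD i 0 ≤ P.getD j 0) :
    ∀ (n lo hi : Nat), hi - lo = n → lo ≤ hi → hi ≤ P.length →
    (∀ j, j < lo → P.getD j 0 ≤ pos) →
    (∀ j, hi ≤ j → j < P.length → pos < P.getD j 0) →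
    (pvBisect P pos lo hi ≤ P.length ∧
     (∀ j, j < pvBisect P pos lo hi → P.getD j 0 ≤ pos) ∧
     (∀ j, pvBisect P pos lo hi ≤ j → j < P.length → pos < P.getD j 0)) := by
  intro n
  induction n using Nat.strong_induction_on with
  | _ n IH =>
      intro lo hi hn hlohi hhi hLo hHi
      rw [pvBisect]
      by_cases hlt : lo < hi
      · rw [if_pos hlt]
        by_cases hm : P.getD ((lo + hi) / 2) 0 ≤ pos
        · rw [if_pos hm]
          have hLo' : ∀ j, j < (lo + hi) / 2 + 1 → P.getD j 0 ≤ pos := by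
            intro j hj
            calc P.getD j 0 ≤ P.getD ((lo + hi) / 2) 0 := hmono j _ (by omega) (by omega)
              _ ≤ pos := hm
          exact IH (hi - ((lo + hi) / 2 + 1)) (by omega) _ _ rfl (by omega) hhi hLo' hHi
        · rw [if_neg hm]
          have hHi' : ∀ j, (lo + hi) / 2 ≤ j → j < P.length → pos < P.getD j 0 := by
            intro j hj hjl
            have := hmono ((lo + hi) / 2) j hj hjl
            omega
          exact IH ((lo + hi) / 2 - lo) (by omega) _ _ rfl (by omega) (by omega) hLo hHi'
      · rw [if_neg hlt]
        have heq : lo = hi := by omega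
        exact ⟨by omega, hLo, by rw [heq]; exact hHi⟩

theorem pvCountP_of_split (pos : Int) : ∀ (P : List Int) (r : Nat), r ≤ P.length →
    (∀ j, j < r → P.getD j 0 ≤ pos) →
    (∀ j, r ≤ j → j < P.length → pos < P.getD j 0) →
    P.countP (fun x => x ≤ pos) = r := by
  intro P
  induction P with
  | nil =>
      intro r hr _ _
      simp only [List.length_nil] at hr
      simp only [List.countP_nil]
      omega
  | cons x xs ih =>
      intro r hr hLo hHi
      match r with
      | 0 =>
          have hx : pos < x := by simpa using hHi 0 (by omega) (by simp)
          have hxb : decide (x ≤ pos) = false := decide_eq_false (by omega)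
          have hxs : xs.countP (fun x => x ≤ pos) = 0 := by
            apply ih 0 (by omega) (by omega)
            intro j _ hj
            simpa using hHi (j + 1) (by omega) (by simpa using hj)
          simp [hxs, hxb]
      | (s+1) =>
          have hx : decide (x ≤ pos) = true :=
            decide_eq_true (by simpa using hLo 0 (by omega))
          have hxs : xs.countP (fun x => x ≤ pos) = s := by
            apply ih s (by simpa using hr)
            · intro j hj; simpa using hLo (j + 1) (by omega)
            · intro j hj hjl; simpa using hHi (j + 1) (by omega) (by simpa using hjl)
          simp [hxs, hx]

-- ===== VERDICT (by name: the statement is the Claim_ definition above) =====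
theorem get_tag_index_spec : Claim_equal_get_tag_index := by
  intro pos tags _
  unfold Spec_get_tag_index get_tag_index
  have hB : get_tag_index_alt pos tags =
      (if pvBisect (pvPrefixRec 0 tags) pos 0 (pvPrefixRec 0 tags).length
            < (pvPrefixRec 0 tags).length
       then ((pvBisect (pvPrefixRec 0 tags) pos 0 (pvPrefixRec 0 tags).length : Nat) : Int)
       else -1) := by
    simp only [get_tag_index_alt, pvPrefix_eq]
  rw [hB, pvGoA]
  set P := pvPrefixRec 0 tags with hP
  have hlen : P.length = tags.length := pvPrefixRec_length tags 0
  have hmono : ∀ i j : Nat, i ≤ j → j < P.length → P.getD i 0 ≤ P.getD j 0 :=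
    fun i j => pvPrefixRec_mono tags 0 i j
  obtain ⟨hr1, hr2, hr3⟩ := pvBisect_inv P pos hmono (P.length - 0) 0 P.length rfl
    (by omega) (le_refl _) (by omega) (by omega)
  have hc : P.countP (fun x => x ≤ pos) = pvBisect P pos 0 P.length :=
    pvCountP_of_split pos P _ hr1 hr2 hr3
  rw [hc, ← hlen]
  split_ifs with h1
  · simp
  · rfl
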